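-- pv_equiv track=rewrite | github.com/laquisha-ayee/Python_Homework | python/week33/friday/aa17-tuples/problems/09-bubble-sum-challenge.py | bubble_sum
-- ===== SOURCE A (Python) =====
-- def bubble_sum(tuples_list):
--
--     result = tuples_list.copy()
--     n = len(result)
--
--     for i in range(n):
--         swapped = False
--         for j in range(0, n - i - 1):
--             if sum(result[j]) > sum(result[j + 1]):
--                 result[j], result[j + 1] = result[j + 1], result[j]
--                 swapped = True
--         if not swapped:
--             break
--
--     return result
-- ===== SOURCE B (Python) =====
-- def bubble_sum(tuples_list):
--     return sorted(tuples_list, key=sum)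
-- ===== Notes on version B (the rewrite author's own statement) =====
-- stated objective: idiomatic
-- what changed: replaces the hand-written adjacent-swap bubble sort with Python's built-in stable sort via sorted(tuples_list, key=sum)
import Mathlib
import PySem

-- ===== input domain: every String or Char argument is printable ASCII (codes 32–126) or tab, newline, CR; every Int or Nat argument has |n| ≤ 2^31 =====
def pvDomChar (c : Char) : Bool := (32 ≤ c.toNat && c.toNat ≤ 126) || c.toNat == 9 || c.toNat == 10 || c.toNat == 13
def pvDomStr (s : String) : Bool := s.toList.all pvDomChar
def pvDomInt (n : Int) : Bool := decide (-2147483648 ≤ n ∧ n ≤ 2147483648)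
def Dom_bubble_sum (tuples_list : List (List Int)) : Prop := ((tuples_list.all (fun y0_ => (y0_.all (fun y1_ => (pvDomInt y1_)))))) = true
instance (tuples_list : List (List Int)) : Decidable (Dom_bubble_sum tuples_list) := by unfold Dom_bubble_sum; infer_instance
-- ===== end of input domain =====

-- B replaces the hand-written bubble sort by the idiomatic built-in stable sort (sorted with key=sum); return values proved equal.


-- ===== PORT A =====
-- one step of the inner loop: `if sum(result[j]) > sum(result[j+1]): swap; swapped = True`
def pvSwapStep (st : List (List Int) × Bool) (j : Nat) : List (List Int) × Bool :=
  if (st.1.getD j []).sum > (st.1.getD (j + 1) []).sum then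
    ((st.1.set j (st.1.getD (j + 1) [])).set (j + 1) (st.1.getD j []), true)
  else st

-- the outer `for i in range(n)` with the `if not swapped: break`; fuel counts the remaining iterations
def pvOuterA (n : Nat) : Nat → Nat → List (List Int) → List (List Int)
  | 0, _, res => res
  | fuel + 1, i, res =>
    let p := (List.range (n - i - 1)).foldl pvSwapStep (res, false)
    if p.2 then pvOuterA n fuel (i + 1) p.1 else p.1

def bubble_sum (tuples_list : List (List Int)) : List (List Int) :=
  let result := tuples_list          -- tuples_list.copy()
  let n := result.length
  pvOuterA n n 0 result

-- ===== PORT B =====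
def bubble_sum_alt (tuples_list : List (List Int)) : List (List Int) :=
  PySem.List.sorted tuples_list (fun t => t.sum) false

-- ===== PRECONDITION & SPEC =====
def Spec_bubble_sum (tuples_list : List (List Int)) (out : List (List Int)) : Prop := out = bubble_sum_alt tuples_list
instance (tuples_list : List (List Int)) (out : List (List Int)) : Decidable (Spec_bubble_sum tuples_list out) := by unfold Spec_bubble_sum; infer_instance

-- ===== CLAIM (what is proved, stated in full; the proofs are below) =====
def Claim_equal_bubble_sum : Prop := ∀ (tuples_list : List (List Int)), Dom_bubble_sum tuples_list → Spec_bubble_sum tuples_list (bubble_sum tuples_list)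

-- ===== LEMMAS AND PROOFS =====

-- reference structural bubble pass/outer loop, generic in the key
def gpass {α : Type} (k : α → Int) : Nat → List α → List α × Bool
  | _, [] => ([], false)
  | 0, x :: t => (x :: t, false)
  | _ + 1, [x] => ([x], false)
  | b + 1, x :: y :: t =>
    if k x > k y then
      (y :: (gpass k b (x :: t)).1, true)
    else
      (x :: (gpass k b (y :: t)).1, (gpass k b (y :: t)).2)

def gouter {α : Type} (k : α → Int) (n : Nat) : Nat → Nat → List α → List α
  | 0, _, l => l
  | fuel + 1, i, l =>
    let p := gpass k (n - i - 1) l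
    if p.2 then gouter k n fuel (i + 1) p.1 else p.1

-- decoration with original positions; strict "stable" order and the tie invariant
def pvDec : Nat → List (List Int) → List (Nat × List Int)
  | _, [] => []
  | j, x :: t => (j, x) :: pvDec (j + 1) t

def pvKeyD (d : Nat × List Int) : Int := d.2.sum
def pvR (a b : Nat × List Int) : Prop := a.2.sum < b.2.sum ∨ (a.2.sum = b.2.sum ∧ a.1 < b.1)
def pvTie (a b : Nat × List Int) : Prop := a.2.sum = b.2.sum → a.1 < b.1
def pvRb (a b : Nat × List Int) : Bool := decide (a.2.sum < b.2.sum) || (decide (a.2.sum = b.2.sum) && decide (a.1 < b.1))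

theorem gpass_perm {α : Type} (k : α → Int) (b : Nat) (l : List α) :
    ((gpass k b l).1).Perm l := by
  induction b generalizing l with
  | zero => cases l <;> simp [gpass]
  | succ b ih =>
    match l with
    | [] => simp [gpass]
    | [x] => simp [gpass]
    | x :: y :: t =>
      by_cases h : k x > k y
      · simpa [gpass, h] using ((ih (x :: t)).cons y).trans (List.Perm.swap x y t)
      · simpa [gpass, h] using (ih (y :: t)).cons x

theorem gpass_length {α : Type} (k : α → Int) (b : Nat) (l : List α) :
    ((gpass k b l).1).length = l.length :=
  (gpass_perm k b l).length_eq

theorem gpass_mem {α : Type} {k : α → Int} {b : Nat} {l : List α} {x : α}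
    (hx : x ∈ (gpass k b l).1) : x ∈ l :=
  (gpass_perm k b l).mem_iff.mp hx

-- the inner-loop fold ignores its initial flag except to OR it in
theorem foldl_swapStep_flag (js : List Nat) (res : List (List Int)) (s : Bool) :
    js.foldl pvSwapStep (res, s) =
      ((js.foldl pvSwapStep (res, false)).1, s || (js.foldl pvSwapStep (res, false)).2) := by
  induction js generalizing res s with
  | nil => simp
  | cons j js ih =>
    simp only [List.foldl_cons]
    by_cases h : ((res.getD j []).sum > (res.getD (j + 1) []).sum)
    · simp only [pvSwapStep, h, if_pos]
      rw [ih _ true]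
      simp
    · simp only [pvSwapStep, h, ite_false]
      exact ih res s

-- shifting the fold past a fixed head element
theorem foldl_swapStep_shift (js : List Nat) (x : List Int) (res : List (List Int)) (s : Bool) :
    (js.map (· + 1)).foldl pvSwapStep (x :: res, s) =
      (x :: (js.foldl pvSwapStep (res, s)).1, (js.foldl pvSwapStep (res, s)).2) := by
  induction js generalizing res s with
  | nil => simp
  | cons j js ih =>
    simp only [List.map_cons, List.foldl_cons]
    have hstep : pvSwapStep (x :: res, s) (j + 1) =
        (x :: (pvSwapStep (res, s) j).1, (pvSwapStep (res, s) j).2) := by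
      simp only [pvSwapStep, List.getD_cons_succ, List.set_cons_succ]
      split <;> simp_all
    rw [hstep, ih]

-- the inner index fold IS the structural pass
theorem foldl_eq_gpass : ∀ (b : Nat) (l : List (List Int)), b + 1 ≤ l.length ∨ b = 0 →
    (List.range b).foldl pvSwapStep (l, false) = gpass (fun t => t.sum) b l := by
  intro b
  induction b with
  | zero => intro l _; cases l <;> simp [gpass]
  | succ b ih =>
    intro l hl
    have hlen : b + 2 ≤ l.length := by omega
    match l, hlen with
    | x :: y :: t, hlen2 =>
      have hx : b + 1 ≤ (x :: t).length := by simp at hlen2 ⊢; omega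
      have hy : b + 1 ≤ (y :: t).length := by simp at hlen2 ⊢; omega
      rw [List.range_succ_eq_map, List.foldl_cons]
      by_cases h : (x.sum > y.sum)
      · have hstep : pvSwapStep (x :: y :: t, false) 0 = (y :: x :: t, true) := by
          simp [pvSwapStep, h]
        rw [hstep, foldl_swapStep_shift, foldl_swapStep_flag, ih (x :: t) (Or.inl hx)]
        simp [gpass, h]
      · have hstep : pvSwapStep (x :: y :: t, false) 0 = (x :: y :: t, false) := by
          simp [pvSwapStep, h]
        rw [hstep, foldl_swapStep_shift, ih (y :: t) (Or.inl hy)]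
        simp [gpass, h]

theorem gpass_append {α : Type} (k : α → Int) :
    ∀ (b : Nat) (f s : List α), b + 1 ≤ f.length →
      gpass k b (f ++ s) = ((gpass k b f).1 ++ s, (gpass k b f).2) := by
  intro b
  induction b with
  | zero =>
    intro f s hf
    match f, hf with
    | x :: t, _ => simp [gpass]
  | succ b ih =>
    intro f s hf
    match f, hf with
    | x :: y :: t, hf2 =>
      have hx : b + 1 ≤ (x :: t).length := by simp at hf2 ⊢; omega
      have hy : b + 1 ≤ (y :: t).length := by simp at hf2 ⊢; omega
      by_cases h : (k x > k y)
      · simp only [List.cons_append, gpass, h, if_pos]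
        show (y :: (gpass k b ((x :: t) ++ s)).1, true) = (y :: ((gpass k b (x :: t)).1 ++ s), true)
        rw [ih (x :: t) s hx]
      · simp only [List.cons_append, gpass, h, ite_false]
        show (x :: (gpass k b ((y :: t) ++ s)).1, (gpass k b ((y :: t) ++ s)).2) =
          (x :: ((gpass k b (y :: t)).1 ++ s), (gpass k b (y :: t)).2)
        rw [ih (y :: t) s hy]

theorem gpass_false {α : Type} (k : α → Int) :
    ∀ (b : Nat) (l : List α), (gpass k b l).2 = false →
      (gpass k b l).1 = l ∧ (List.take (b + 1) l).IsChain (fun a c => k a ≤ k c) := by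
  intro b
  induction b with
  | zero =>
    intro l _
    cases l <;> simp [gpass]
  | succ b ih =>
    intro l hl
    match l with
    | [] => simp [gpass]
    | [x] => simp [gpass]
    | x :: y :: t =>
      by_cases h : (k x > k y)
      · simp [gpass, h] at hl
      · simp only [gpass, h, ite_false] at hl ⊢
        obtain ⟨h1, h2⟩ := ih (y :: t) hl
        refine ⟨by rw [h1], ?_⟩
        simp only [List.take_succ_cons]
        exact List.isChain_cons_cons.mpr ⟨by omega, by simpa [List.take_succ_cons] using h2⟩

theorem pvOuterA_eq_gouter (n : Nat) :
    ∀ (fuel i : Nat) (l : List (List Int)), l.length = n →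
      pvOuterA n fuel i l = gouter (fun t => t.sum) n fuel i l := by
  intro fuel
  induction fuel with
  | zero => intro i l _; rfl
  | succ fuel ih =>
    intro i l hl
    have hcond : (n - i - 1) + 1 ≤ l.length ∨ n - i - 1 = 0 := by omega
    simp only [pvOuterA, gouter]
    rw [foldl_eq_gpass _ _ hcond]
    by_cases hp : (gpass (fun t => t.sum) (n - i - 1) l).2
    · simp only [hp, if_pos]
      exact ih (i + 1) _ ((gpass_length _ _ _).trans hl)
    · simp [hp]

theorem pvR_trans (a b c : Nat × List Int) : pvR a b → pvR b c → pvR a c := by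
  unfold pvR; omega

theorem pvR_asymm (a b : Nat × List Int) : pvR a b → pvR b a → False := by
  unfold pvR; omega

theorem pvDec_map_snd : ∀ (j : Nat) (xs : List (List Int)), (pvDec j xs).map Prod.snd = xs := by
  intro j xs
  induction xs generalizing j with
  | nil => rfl
  | cons x t ih => simp [pvDec, ih]

theorem pvDec_length (j : Nat) (xs : List (List Int)) : (pvDec j xs).length = xs.length := by
  rw [← pvDec_map_snd j xs, List.length_map, pvDec_map_snd]

theorem pvDec_ge : ∀ (j : Nat) (xs : List (List Int)) (d : Nat × List Int),
    d ∈ pvDec j xs → j ≤ d.1 := by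
  intro j xs
  induction xs generalizing j with
  | nil => simp [pvDec]
  | cons x t ih =>
    intro d hd
    simp only [pvDec, List.mem_cons] at hd
    rcases hd with h | h
    · subst h; simp
    · exact Nat.le_of_succ_le (ih (j + 1) d h)

theorem pvDec_pairwise : ∀ (j : Nat) (xs : List (List Int)),
    (pvDec j xs).Pairwise (fun a b => a.1 < b.1) := by
  intro j xs
  induction xs generalizing j with
  | nil => simp [pvDec]
  | cons x t ih =>
    simp only [pvDec, List.pairwise_cons]
    exact ⟨fun d hd => Nat.lt_of_succ_le (pvDec_ge (j + 1) t d hd), ih (j + 1)⟩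

theorem gpass_map_snd : ∀ (b : Nat) (l : List (Nat × List Int)),
    gpass (fun t => t.sum) b (l.map Prod.snd) =
      ((gpass pvKeyD b l).1.map Prod.snd, (gpass pvKeyD b l).2) := by
  intro b
  induction b with
  | zero => intro l; cases l <;> simp [gpass]
  | succ b ih =>
    intro l
    match l with
    | [] => simp [gpass]
    | [d] => simp [gpass]
    | d :: e :: t =>
      by_cases h : (d.2.sum > e.2.sum)
      · have := ih (d :: t)
        simp only [List.map_cons, gpass, pvKeyD, h, if_pos] at this ⊢
        rw [this]
      · have := ih (e :: t)
        simp only [List.map_cons, gpass, pvKeyD, h, ite_false] at this ⊢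
        rw [this]

theorem gouter_map_snd (n : Nat) : ∀ (fuel i : Nat) (l : List (Nat × List Int)),
    gouter (fun t => t.sum) n fuel i (l.map Prod.snd) = (gouter pvKeyD n fuel i l).map Prod.snd := by
  intro fuel
  induction fuel with
  | zero => intro i l; rfl
  | succ fuel ih =>
    intro i l
    simp only [gouter, gpass_map_snd]
    by_cases hp : (gpass pvKeyD (n - i - 1) l).2 <;> simp [hp, ih (i + 1)]

theorem gouter_perm {α : Type} (k : α → Int) (n : Nat) :
    ∀ (fuel i : Nat) (l : List α), (gouter k n fuel i l).Perm l := by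
  intro fuel
  induction fuel with
  | zero => intro i l; exact List.Perm.refl l
  | succ fuel ih =>
    intro i l
    simp only [gouter]
    by_cases hp : (gpass k (n - i - 1) l).2
    · simpa [hp] using (ih (i + 1) _).trans (gpass_perm k (n - i - 1) l)
    · simpa [hp] using gpass_perm k (n - i - 1) l

theorem gpass_tie : ∀ (b : Nat) (l : List (Nat × List Int)), l.Pairwise pvTie →
    ((gpass pvKeyD b l).1).Pairwise pvTie := by
  intro b
  induction b with
  | zero =>
    intro l hl
    cases l with
    | nil => simp [gpass]
    | cons x t => simpa [gpass] using hl
  | succ b ih =>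
    intro l hl
    match l with
    | [] => simp [gpass]
    | [x] => simp [gpass]
    | x :: y :: t =>
      simp only [List.pairwise_cons, List.mem_cons] at hl
      obtain ⟨hx, hy, ht⟩ := hl
      by_cases h : (pvKeyD x > pvKeyD y)
      · simp only [gpass, h, if_pos, List.pairwise_cons]
        refine ⟨?_, ih (x :: t) ?_⟩
        · intro z hz
          have hz' : z ∈ x :: t := gpass_mem hz
          rcases List.mem_cons.mp hz' with h1 | h1
          · subst h1
            intro he
            exfalso
            simp only [pvKeyD] at h
            omega
          · exact hy z h1
        · exact List.pairwise_cons.mpr ⟨fun z hz => hx z (Or.inr hz), ht⟩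
      · simp only [gpass, h, ite_false, List.pairwise_cons]
        refine ⟨?_, ih (y :: t) (List.pairwise_cons.mpr ⟨hy, ht⟩)⟩
        intro z hz
        have hz' : z ∈ y :: t := gpass_mem hz
        rcases List.mem_cons.mp hz' with h1 | h1
        · subst h1; exact hx z (Or.inl rfl)
        · exact hx z (Or.inr h1)

theorem gpass_last : ∀ (b : Nat) (f : List (Nat × List Int)), b + 1 = f.length →
    f.Pairwise pvTie →
    ∃ g m, (gpass pvKeyD b f).1 = g ++ [m] ∧ ∀ x ∈ g, pvR x m := by
  intro b
  induction b with
  | zero =>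
    intro f hf _
    match f, hf with
    | [x], _ => exact ⟨[], x, rfl, by simp⟩
  | succ b ih =>
    intro f hf hp
    match f, hf with
    | x :: y :: t, hf2 =>
      simp only [List.pairwise_cons, List.mem_cons] at hp
      obtain ⟨hx, hy, ht⟩ := hp
      by_cases h : (pvKeyD x > pvKeyD y)
      · obtain ⟨g, m, hgm, hRm⟩ := ih (x :: t) (by simp at hf2 ⊢; omega)
          (List.pairwise_cons.mpr ⟨fun z hz => hx z (Or.inr hz), ht⟩)
        refine ⟨y :: g, m, ?_, ?_⟩
        · simp only [gpass, h, if_pos, hgm, List.cons_append]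
        · intro z hz
          rcases List.mem_cons.mp hz with h1 | h1
          · subst h1
            have hm : m ∈ x :: t := gpass_mem (by rw [hgm]; simp)
            by_cases hmx : m = x
            · subst hmx
              left
              simpa [pvKeyD] using h
            · have hxg : x ∈ g := by
                have hx2 : x ∈ (gpass pvKeyD b (x :: t)).1 :=
                  (gpass_perm pvKeyD b (x :: t)).mem_iff.mpr (List.mem_cons_self)
                rw [hgm] at hx2
                rcases List.mem_append.mp hx2 with h2 | h2
                · exact h2
                · simp at h2; exact absurd h2.symm hmx
              have := hRm x hxg
              simp only [pvKeyD] at h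
              unfold pvR at this ⊢
              omega
          · exact hRm z h1
      · obtain ⟨g, m, hgm, hRm⟩ := ih (y :: t) (by simp at hf2 ⊢; omega)
          (List.pairwise_cons.mpr ⟨hy, ht⟩)
        refine ⟨x :: g, m, ?_, ?_⟩
        · simp only [gpass, h, ite_false, hgm, List.cons_append]
        · intro z hz
          rcases List.mem_cons.mp hz with h1 | h1
          · subst h1
            have hm : m ∈ y :: t := gpass_mem (by rw [hgm]; simp)
            have htie := hx m (List.mem_cons.mp hm)
            have hkm : pvKeyD y ≤ pvKeyD m := by
              by_cases hmy : m = y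
              · subst hmy; exact le_refl _
              · have hyg : y ∈ g := by
                  have hy2 : y ∈ (gpass pvKeyD b (y :: t)).1 :=
                    (gpass_perm pvKeyD b (y :: t)).mem_iff.mpr (List.mem_cons_self)
                  rw [hgm] at hy2
                  rcases List.mem_append.mp hy2 with h2 | h2
                  · exact h2
                  · simp at h2; exact absurd h2.symm hmy
                have := hRm y hyg
                unfold pvR at this
                simp only [pvKeyD]
                omega
            simp only [pvKeyD] at h hkm
            unfold pvTie at htie
            unfold pvR
            omega
          · exact hRm z h1

theorem chain_tie_pairwiseR (f : List (Nat × List Int))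
    (hc : f.IsChain (fun a c => pvKeyD a ≤ pvKeyD c)) (hp : f.Pairwise pvTie) :
    f.Pairwise pvR := by
  have key : ∀ (l : List (Nat × List Int)),
      l.IsChain (fun a c => pvKeyD a ≤ pvKeyD c) → l.Pairwise pvTie → l.IsChain pvR := by
    intro l
    induction l with
    | nil => simp
    | cons x t ih =>
      match t with
      | [] => simp
      | y :: t' =>
        intro hc hp
        rw [List.isChain_cons_cons] at hc ⊢
        rw [List.pairwise_cons] at hp
        refine ⟨?_, ih hc.2 hp.2⟩
        have htie := hp.1 y List.mem_cons_self
        have hk := hc.1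
        simp only [pvKeyD] at hk
        unfold pvTie at htie
        unfold pvR
        omega
  exact @List.IsChain.pairwise _ _ _ ⟨fun hab hbc => pvR_trans _ _ _ hab hbc⟩ (key f hc hp)

theorem gouter_sorted (n : Nat) : ∀ (fuel i : Nat) (f s : List (Nat × List Int)),
    i + fuel = n → (f ++ s).Pairwise pvTie → f.length = fuel → s.Pairwise pvR →
    (∀ x ∈ f, ∀ y ∈ s, pvR x y) →
    (gouter pvKeyD n fuel i (f ++ s)).Pairwise pvR := by
  intro fuel
  induction fuel with
  | zero =>
    intro i f s _ _ hf hs _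
    have : f = [] := List.length_eq_zero_iff.mp hf
    subst this
    simpa [gouter] using hs
  | succ fuel ih =>
    intro i f s hin htie hf hs hcross
    obtain ⟨ptf, pts, ctie⟩ := List.pairwise_append.mp htie
    have hb : n - i - 1 = fuel := by omega
    have hfl : fuel + 1 ≤ f.length := by omega
    simp only [gouter, hb, gpass_append pvKeyD fuel f s hfl]
    by_cases hflag : (gpass pvKeyD fuel f).2
    · simp only [hflag, if_pos]
      obtain ⟨g, m, hgm, hRm⟩ := gpass_last fuel f (by omega) ptf
      have hmem : ∀ z ∈ g ++ [m], z ∈ f := by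
        intro z hz
        exact gpass_mem (by rw [hgm]; exact hz)
      have hlist : (gpass pvKeyD fuel f).1 ++ s = g ++ (m :: s) := by
        rw [hgm, List.append_assoc]
        rfl
      rw [hlist]
      apply ih (i + 1) g (m :: s) (by omega)
      · apply List.pairwise_append.mpr
        refine ⟨?_, ?_, ?_⟩
        · have := gpass_tie fuel f ptf
          rw [hgm] at this
          exact (List.pairwise_append.mp this).1
        · apply List.pairwise_cons.mpr
          refine ⟨?_, pts⟩
          intro y hy
          exact ctie m (hmem m (by simp)) y hy
        · intro a ha b hb
          have haf : a ∈ f := hmem a (List.mem_append.mpr (Or.inl ha))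
          rcases List.mem_cons.mp hb with h1 | h1
          · subst h1
            have := gpass_tie fuel f ptf
            rw [hgm] at this
            exact ((List.pairwise_append.mp this).2.2) a ha b (by simp)
          · exact ctie a haf b h1
      · have hlen : (g ++ [m]).length = f.length := by rw [← hgm]; exact gpass_length _ _ _
        simp at hlen
        omega
      · apply List.pairwise_cons.mpr
        exact ⟨fun y hy => hcross m (hmem m (by simp)) y hy, hs⟩
      · intro a ha y hy
        rcases List.mem_cons.mp hy with h1 | h1
        · subst h1; exact hRm a ha
        · exact hcross a (hmem a (List.mem_append.mpr (Or.inl ha))) y h1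
    · simp only [hflag, if_neg Bool.false_ne_true]
      have hflag2 : (gpass pvKeyD fuel (f ++ s)).2 = false := by
        rw [gpass_append pvKeyD fuel f s hfl]
        simpa using hflag
      obtain ⟨heq, hchain⟩ := gpass_false pvKeyD fuel (f ++ s) hflag2
      rw [gpass_append pvKeyD fuel f s hfl] at heq
      simp only at heq
      rw [heq]
      have htake : List.take (fuel + 1) (f ++ s) = f := by
        rw [← hf]
        exact List.take_left
      rw [htake] at hchain
      exact List.pairwise_append.mpr ⟨chain_tie_pairwiseR f hchain ptf, hs, hcross⟩

def pvSb (a b : List Int) : Bool := decide (a.sum < b.sum)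

theorem pvRb_true_iff (a b : Nat × List Int) : pvRb a b = true ↔ pvR a b := by
  simp [pvRb, pvR]

theorem pvRb_eq_pvSb (d y : Nat × List Int) (h : y.1 < d.1) : pvRb d y = pvSb d.2 y.2 := by
  by_cases hA : d.2.sum < y.2.sum
  · simp [pvRb, pvSb, hA]
  · simp [pvRb, pvSb, hA, show ¬(d.1 < y.1) by omega]

theorem insertBy_map_snd : ∀ (acc : List (Nat × List Int)) (d : Nat × List Int),
    (∀ y ∈ acc, y.1 < d.1) →
    (PySem.List.insertBy pvRb d acc).map Prod.snd =
      PySem.List.insertBy pvSb d.2 (acc.map Prod.snd) := by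
  intro acc
  induction acc with
  | nil => intro d _; simp [PySem.List.insertBy]
  | cons y t ih =>
    intro d hlt
    have hcond := pvRb_eq_pvSb d y (hlt y List.mem_cons_self)
    by_cases hb : pvRb d y
    · simp [PySem.List.insertBy, hb, ← hcond]
    · simp only [PySem.List.insertBy, hb, Bool.false_eq_true, ite_false, List.map_cons,
        ← hcond]
      rw [ih d (fun z hz => hlt z (List.mem_cons_of_mem y hz))]

theorem insertBy_perm {α : Type} (before : α → α → Bool) (x : α) :
    ∀ (acc : List α), (PySem.List.insertBy before x acc).Perm (x :: acc) := by
  intro acc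
  induction acc with
  | nil => simp [PySem.List.insertBy]
  | cons y t ih =>
    by_cases hb : before x y
    · simp [PySem.List.insertBy, hb]
    · simp only [PySem.List.insertBy, hb, Bool.false_eq_true, ite_false]
      exact (ih.cons y).trans (List.Perm.swap x y t)

theorem foldl_insert_perm : ∀ (ds acc : List (Nat × List Int)),
    (ds.foldl (fun acc d => PySem.List.insertBy pvRb d acc) acc).Perm (ds ++ acc) := by
  intro ds
  induction ds with
  | nil => intro acc; simp
  | cons d ds ih =>
    intro acc
    simp only [List.foldl_cons, List.cons_append]
    exact ((ih _).trans ((insertBy_perm pvRb d acc).append_left ds)).trans List.perm_middle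

theorem insertBy_sortedR (d : Nat × List Int) : ∀ (acc : List (Nat × List Int)),
    acc.Pairwise pvR → (∀ y ∈ acc, y.1 ≠ d.1) →
    (PySem.List.insertBy pvRb d acc).Pairwise pvR := by
  intro acc
  induction acc with
  | nil => intro _ _; simp [PySem.List.insertBy]
  | cons y t ih =>
    intro hp hne
    rw [List.pairwise_cons] at hp
    by_cases hb : pvRb d y
    · simp only [PySem.List.insertBy, hb, ite_true]
      apply List.pairwise_cons.mpr
      refine ⟨?_, List.pairwise_cons.mpr hp⟩
      intro z hz
      rcases List.mem_cons.mp hz with h1 | h1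
      · rw [h1]; exact (pvRb_true_iff d y).mp hb
      · exact pvR_trans _ _ _ ((pvRb_true_iff d y).mp hb) (hp.1 z h1)
    · simp only [PySem.List.insertBy, hb, Bool.false_eq_true, ite_false]
      apply List.pairwise_cons.mpr
      refine ⟨?_, ih hp.2 (fun z hz => hne z (List.mem_cons_of_mem y hz))⟩
      intro z hz
      rcases (PySem.List.mem_insertBy pvRb d z t).mp hz with h1 | h1
      · rw [h1]
        have h2 : ¬ pvR d y := fun hc => hb ((pvRb_true_iff d y).mpr hc)
        have h3 : y.1 ≠ d.1 := hne y List.mem_cons_self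
        unfold pvR at h2 ⊢
        omega
      · exact hp.1 z h1

theorem foldl_insert_sortedR : ∀ (ds acc : List (Nat × List Int)),
    acc.Pairwise pvR → ds.Pairwise (fun a b => a.1 < b.1) →
    (∀ y ∈ acc, ∀ d ∈ ds, y.1 ≠ d.1) →
    (ds.foldl (fun acc d => PySem.List.insertBy pvRb d acc) acc).Pairwise pvR := by
  intro ds
  induction ds with
  | nil => intro acc h _ _; simpa using h
  | cons d ds ih =>
    intro acc hacc hds hne
    rw [List.pairwise_cons] at hds
    simp only [List.foldl_cons]
    apply ih _ (insertBy_sortedR d acc hacc (fun y hy => hne y hy d List.mem_cons_self))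
      hds.2
    intro y hy e he
    rcases (PySem.List.mem_insertBy pvRb d y acc).mp hy with h1 | h1
    · subst h1; exact Nat.ne_of_lt (hds.1 e he)
    · exact hne y h1 e (List.mem_cons_of_mem d he)

theorem foldl_insert_map_snd : ∀ (ds acc : List (Nat × List Int)),
    ds.Pairwise (fun a b => a.1 < b.1) →
    (∀ y ∈ acc, ∀ d ∈ ds, y.1 < d.1) →
    ((ds.foldl (fun acc d => PySem.List.insertBy pvRb d acc) acc)).map Prod.snd =
      (ds.map Prod.snd).foldl (fun acc t => PySem.List.insertBy pvSb t acc) (acc.map Prod.snd) := by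
  intro ds
  induction ds with
  | nil => intro acc _ _; rfl
  | cons d ds ih =>
    intro acc hds hlt
    rw [List.pairwise_cons] at hds
    simp only [List.foldl_cons, List.map_cons]
    rw [← insertBy_map_snd acc d (fun y hy => hlt y hy d List.mem_cons_self)]
    apply ih _ hds.2
    intro y hy e he
    rcases (PySem.List.mem_insertBy pvRb d y acc).mp hy with h1 | h1
    · subst h1; exact hds.1 e he
    · exact Nat.lt_trans (hlt y h1 d List.mem_cons_self) (hds.1 e he)

-- ===== VERDICT (by name: the statement is the Claim_ definition above) =====
theorem bubble_sum_main (tl : List (List Int)) :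
    bubble_sum tl = bubble_sum_alt tl := by
  show pvOuterA tl.length tl.length 0 tl = PySem.List.sorted tl (fun t => t.sum) false
  rw [pvOuterA_eq_gouter tl.length tl.length 0 tl rfl]
  have hn : (pvDec 0 tl).length = tl.length := pvDec_length 0 tl
  have htie : (pvDec 0 tl).Pairwise pvTie := by
    refine (pvDec_pairwise 0 tl).imp ?_
    intro a b h
    exact fun _ => h
  -- the bubble result, decorated
  have hA : gouter (fun t => t.sum) tl.length tl.length 0 tl =
      (gouter pvKeyD tl.length tl.length 0 (pvDec 0 tl)).map Prod.snd := by
    have hh := gouter_map_snd tl.length tl.length 0 (pvDec 0 tl)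
    rw [pvDec_map_snd 0 tl] at hh
    exact hh
  -- the bubble result is the strict stable order
  have hBsort : (gouter pvKeyD tl.length tl.length 0 (pvDec 0 tl)).Pairwise pvR := by
    have h0 := gouter_sorted tl.length tl.length 0 (pvDec 0 tl) [] (Nat.zero_add _)
      (by simpa using htie) hn List.Pairwise.nil (by simp)
    simpa using h0
  -- so is the insertion-sort result
  have hIsort : ((pvDec 0 tl).foldl
      (fun acc d => PySem.List.insertBy pvRb d acc) []).Pairwise pvR :=
    foldl_insert_sortedR (pvDec 0 tl) [] List.Pairwise.nil (pvDec_pairwise 0 tl) (by simp)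
  have hperm : (gouter pvKeyD tl.length tl.length 0 (pvDec 0 tl)).Perm
      ((pvDec 0 tl).foldl (fun acc d => PySem.List.insertBy pvRb d acc) []) := by
    refine (gouter_perm pvKeyD tl.length tl.length 0 (pvDec 0 tl)).trans ?_
    have := foldl_insert_perm (pvDec 0 tl) []
    simpa using this.symm
  have heq : gouter pvKeyD tl.length tl.length 0 (pvDec 0 tl) =
      (pvDec 0 tl).foldl (fun acc d => PySem.List.insertBy pvRb d acc) [] :=
    List.Perm.eq_of_pairwise
      (fun a b _ _ hab hba => absurd hba (fun h => pvR_asymm a b hab h))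
      hBsort hIsort hperm
  rw [hA, heq]
  have hmap := foldl_insert_map_snd (pvDec 0 tl) [] (pvDec_pairwise 0 tl) (by simp)
  rw [hmap, pvDec_map_snd 0 tl]
  rw [PySem.List.sorted_eq_foldl_insertBy tl (fun t => t.sum)]
  rfl

theorem bubble_sum_spec : Claim_equal_bubble_sum := by
  intro tl _
  unfold Spec_bubble_sum
  exact bubble_sum_main tl
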